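-- pv_equiv track=rewrite | github.com/Henrique-zoo/Projeto-TR1 | src/transmissor/camada_fisica.py | bipolar
-- ===== SOURCE A (Python) =====
-- def bipolar(bit_stream: list[bool]) -> list[int]:
--     """
--     Realiza a modulação bipolar.
--     Alterna entre +1 e -1 para bits 1, mantendo 0 para bits 0.
--     """
--     last_one: int = -1  # Último valor usado para bit 1 (+1 ou -1)
--     dig_signal: list[int] = []
--
--     for bit in bit_stream:
--         if not bit:
--             dig_signal.append(0)  # Adiciona 0 para bits 0
--         else:
--             last_one = -last_one  # Alterna o valor de last_one
--             dig_signal.append(last_one)  # Adiciona +1 ou -1 para bits 1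
--     return dig_signal
-- ===== SOURCE B (Python) =====
-- from itertools import accumulate
--
-- def bipolar(bit_stream: list[bool]) -> list[int]:
--     # Prefix table of running one-counts, then a parity-driven mapping pass.
--     counts = list(accumulate(int(bool(bit)) for bit in bit_stream))
--     return [0 if not bit else (1 if c % 2 == 1 else -1)
--             for bit, c in zip(bit_stream, counts)]
-- ===== Notes on version B (the rewrite author's own statement) =====
-- stated objective: alternative
-- what changed: Replaces the single flipping last_one state variable with a prefix table of running one-counts (itertools.accumulate) consumed by a second parity-driven mapping pass.
import Mathlib
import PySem

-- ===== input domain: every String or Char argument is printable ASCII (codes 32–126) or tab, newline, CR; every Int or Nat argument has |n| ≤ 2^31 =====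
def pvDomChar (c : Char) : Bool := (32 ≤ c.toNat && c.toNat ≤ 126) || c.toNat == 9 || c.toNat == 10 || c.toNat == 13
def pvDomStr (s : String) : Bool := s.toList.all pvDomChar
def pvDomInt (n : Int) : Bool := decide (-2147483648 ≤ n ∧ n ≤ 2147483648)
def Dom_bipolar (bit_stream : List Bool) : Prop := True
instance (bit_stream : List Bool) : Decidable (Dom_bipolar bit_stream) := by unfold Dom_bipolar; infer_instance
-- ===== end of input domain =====

-- B replaces A's flipping state variable with a prefix table of running one-counts plus a parity-driven mapping pass (alternative decomposition, same cost).

-- ===== PORT A =====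
def bipolar (bit_stream : List Bool) : List Int :=
  (bit_stream.foldl
    (fun (st : Int × List Int) bit =>
      if !bit then (st.1, st.2 ++ [0])
      else (-st.1, st.2 ++ [-st.1]))
    (-1, [])).2

-- ===== PORT B =====
-- running one-counts: accumulate(int(bit) for bit in bit_stream)
def bipolarCounts : List Bool → Int → List Int
  | [], _ => []
  | b :: t, c =>
    let c' := c + (if b then 1 else 0)
    c' :: bipolarCounts t c'

def bipolar_alt (bit_stream : List Bool) : List Int :=
  (bit_stream.zip (bipolarCounts bit_stream 0)).map
    (fun p => if !p.1 then 0 else if p.2 % 2 = 1 then 1 else -1)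

-- ===== PRECONDITION & SPEC =====
def Spec_bipolar (bit_stream : List Bool) (out : List Int) : Prop := out = bipolar_alt bit_stream
instance (bit_stream : List Bool) (out : List Int) : Decidable (Spec_bipolar bit_stream out) := by unfold Spec_bipolar; infer_instance

-- ===== CLAIM (what is proved, stated in full; the proofs are below) =====
def Claim_equal_bipolar : Prop := ∀ (bit_stream : List Bool), Dom_bipolar bit_stream → Spec_bipolar bit_stream (bipolar bit_stream)

-- ===== LEMMAS AND PROOFS =====
def pvSgn (c : Int) : Int := if c % 2 = 1 then 1 else -1

theorem pvSgn_succ (c : Int) : -pvSgn c = pvSgn (c + 1) := by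
  unfold pvSgn; split_ifs <;> omega

theorem bipolar_loop (bs : List Bool) :
    ∀ (c : Int) (acc : List Int),
    (bs.foldl
      (fun (st : Int × List Int) bit =>
        if !bit then (st.1, st.2 ++ [0])
        else (-st.1, st.2 ++ [-st.1]))
      (pvSgn c, acc)).2
    = acc ++ (bs.zip (bipolarCounts bs c)).map
        (fun p => if !p.1 then 0 else if p.2 % 2 = 1 then 1 else -1) := by
  induction bs with
  | nil => intro c acc; simp
  | cons b t ih =>
    intro c acc
    cases b with
    | false =>
      have hc : bipolarCounts (false :: t) c = c :: bipolarCounts t c := by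
        simp [bipolarCounts]
      rw [hc]
      simp only [List.foldl_cons, List.zip_cons_cons, List.map_cons]
      simp only [Bool.not_false, reduceIte]
      rw [ih c (acc ++ [0])]
      simp
    | true =>
      have hc : bipolarCounts (true :: t) c = (c + 1) :: bipolarCounts t (c + 1) := by
        simp [bipolarCounts]
      rw [hc]
      simp only [List.foldl_cons, List.zip_cons_cons, List.map_cons]
      show (List.foldl
          (fun (st : Int × List Int) bit =>
            if !bit then (st.1, st.2 ++ [0]) else (-st.1, st.2 ++ [-st.1]))
          (-pvSgn c, acc ++ [-pvSgn c]) t).2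
        = acc ++ (if (c + 1) % 2 = 1 then (1 : Int) else -1) ::
            (t.zip (bipolarCounts t (c + 1))).map
              (fun p => if !p.1 then 0 else if p.2 % 2 = 1 then 1 else -1)
      rw [pvSgn_succ c, ih (c + 1) (acc ++ [pvSgn (c + 1)])]
      have hv : (if (c + 1) % 2 = 1 then (1 : Int) else -1) = pvSgn (c + 1) := rfl
      rw [hv]
      simp

-- ===== VERDICT (by name: the statement is the Claim_ definition above) =====
theorem bipolar_spec : Claim_equal_bipolar := by
  intro bs _
  unfold Spec_bipolar bipolar bipolar_alt
  have h : ((-1 : Int), ([] : List Int)) = (pvSgn 0, []) := by unfold pvSgn; norm_num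
  rw [h, bipolar_loop bs 0 []]
  simp only [List.nil_append]
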